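-- pv_equiv track=rewrite | github.com/albertcai101/convex-tree-alternating-optimizer | serial_ops.py | __get_serialized_path_from_index_recursive
-- ===== SOURCE A (Python) =====
-- def __get_serialized_path_from_index_recursive(index: int, path: str, subtree_depth: int):
--     if index == 0:
--         return path
--
--     left_or_right = index // (2**subtree_depth)
--     residual = index % (2**subtree_depth)
--
--     if left_or_right == 0:
--         return __get_serialized_path_from_index_recursive(index - 1, path + '0', subtree_depth - 1)
--     elif left_or_right == 1:
--         return __get_serialized_path_from_index_recursive(residual, path + '1', subtree_depth - 1)
--     else:
--         raise ValueError(f"Invalid index: {index}")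
-- ===== SOURCE B (Python) =====
-- def __get_serialized_path_from_index_recursive(index: int, path: str, subtree_depth: int):
--     if index == 0:
--         return path
--     if subtree_depth < 0 or not (0 <= index < 2 ** (subtree_depth + 1)):
--         raise ValueError(f"Invalid index: {index}")
--     bits = []
--     while index:
--         half = 2 ** subtree_depth
--         if index >= half:
--             bits.append('1')
--             index -= half
--         else:
--             bits.append('0')
--             index -= 1
--         subtree_depth -= 1
--     return path + ''.join(bits)
-- ===== Notes on version B (the rewrite author's own statement) =====
-- stated objective: alternative
-- what changed: Replaces the recursive descent that recomputes floordiv/mod and copies the growing path string at every level by an up-front range validation followed by an iterative loop that compares the index against 2**depth, subtracts, and collects bits in a list joined once at the end.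
import Mathlib
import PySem

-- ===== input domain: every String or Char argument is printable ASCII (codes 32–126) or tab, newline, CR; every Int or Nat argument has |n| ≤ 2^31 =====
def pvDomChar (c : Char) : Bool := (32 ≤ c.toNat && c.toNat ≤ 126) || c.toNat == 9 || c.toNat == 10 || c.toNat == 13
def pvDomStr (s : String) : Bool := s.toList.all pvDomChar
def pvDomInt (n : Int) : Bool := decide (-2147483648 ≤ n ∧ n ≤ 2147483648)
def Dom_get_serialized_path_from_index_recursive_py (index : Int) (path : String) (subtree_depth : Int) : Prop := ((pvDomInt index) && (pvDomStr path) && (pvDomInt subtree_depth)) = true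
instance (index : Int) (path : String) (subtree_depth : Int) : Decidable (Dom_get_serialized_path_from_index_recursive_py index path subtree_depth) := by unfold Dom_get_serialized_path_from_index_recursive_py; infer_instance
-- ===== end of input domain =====

-- B replaces A's recursive descent (floordiv/mod + string concatenation per level) by an
-- up-front range validation and an iterative compare-and-subtract loop collecting bits in a list.


-- ===== PORT A =====
-- A's recursion, on the char list of the accumulated path; `none` = ValueError.
-- For subtree_depth < 0 Python computes 2**subtree_depth as a float 2^d ≤ 0.5; then for any
-- index ≠ 0 the float floordiv index // 2**d is ≥ 2 (if index ≥ 1) or ≤ -2 (if index ≤ -1),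
-- so the `else` branch raises ValueError: we return none there, exactly matching Python.
def pvA_rec (index : Int) (path : List Char) (subtree_depth : Int) : Option (List Char) :=
  if index = 0 then some path
  else if subtree_depth < 0 then none
  else
    let p : Int := 2 ^ subtree_depth.toNat
    let left_or_right := PySem.Int.floordiv index p
    let residual := PySem.Int.mod index p
    if left_or_right = 0 then pvA_rec (index - 1) (path ++ ['0']) (subtree_depth - 1)
    else if left_or_right = 1 then pvA_rec residual (path ++ ['1']) (subtree_depth - 1)
    else none
  termination_by index.toNat
  decreasing_by
  · have hp : (0:Int) < 2 ^ subtree_depth.toNat := by positivity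
    have h0 : PySem.Int.floordiv index (2 ^ subtree_depth.toNat) = 0 := by assumption
    rw [PySem.Int.floordiv_eq_iff_of_pos hp] at h0
    omega
  · have hp : (0:Int) < 2 ^ subtree_depth.toNat := by positivity
    have h1 : PySem.Int.floordiv index (2 ^ subtree_depth.toNat) = 1 := by assumption
    rw [PySem.Int.floordiv_eq_iff_of_pos hp] at h1
    have hm' := PySem.Int.mod_lt index hp
    have hm := PySem.Int.mod_nonneg index hp
    omega

def get_serialized_path_from_index_recursive_py (index : Int) (path : String) (subtree_depth : Int) : String :=
  match pvA_rec index path.toList subtree_depth with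
  | some cs => String.ofList cs
  | none => ""   -- Python raises ValueError here (excluded by Pre_)

-- ===== PORT B =====
-- B's while-loop (half = 2 ** subtree_depth inlined): the validation guarantees the loop only
-- runs with subtree_depth ≥ 0, so 2 ** subtree_depth is 2 ^ subtree_depth.toNat; the ≤ 0 guard
-- (Python: `while index:`) only makes the recursion total.
def pvB_loop (index : Int) (subtree_depth : Int) (bits : List Char) : List Char :=
  if index ≤ 0 then bits
  else if 2 ^ subtree_depth.toNat ≤ index then
    pvB_loop (index - 2 ^ subtree_depth.toNat) (subtree_depth - 1) (bits ++ ['1'])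
  else
    pvB_loop (index - 1) (subtree_depth - 1) (bits ++ ['0'])
  termination_by index.toNat
  decreasing_by
  · have h1 : (1:Int) ≤ 2 ^ subtree_depth.toNat := one_le_pow₀ (by norm_num)
    omega
  · omega

def get_serialized_path_from_index_recursive_py_alt (index : Int) (path : String) (subtree_depth : Int) : String :=
  if index = 0 then path
  else if subtree_depth < 0 ∨ ¬ (0 ≤ index ∧ index < 2 ^ (subtree_depth + 1).toNat) then ""  -- raise ValueError (excluded by Pre_)
  else String.ofList (path.toList ++ pvB_loop index subtree_depth [])

-- ===== PRECONDITION & SPEC =====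
-- Pre_ is exactly the set of inputs on which Python A returns normally; on all other inputs
-- A raises ValueError (invalid index for the given subtree depth).
def Pre_get_serialized_path_from_index_recursive_py (index : Int) (path : String) (subtree_depth : Int) : Prop :=
  index = 0 ∨ (0 ≤ subtree_depth ∧ 0 < index ∧ index < 2 ^ (subtree_depth + 1).toNat)
instance (index : Int) (path : String) (subtree_depth : Int) : Decidable (Pre_get_serialized_path_from_index_recursive_py index path subtree_depth) := by unfold Pre_get_serialized_path_from_index_recursive_py; infer_instance

def pvWitness_get_serialized_path_from_index_recursive_py : Int × String × Int := (5, "x", 2)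

def Spec_get_serialized_path_from_index_recursive_py (index : Int) (path : String) (subtree_depth : Int) (out : String) : Prop := out = get_serialized_path_from_index_recursive_py_alt index path subtree_depth
instance (index : Int) (path : String) (subtree_depth : Int) (out : String) : Decidable (Spec_get_serialized_path_from_index_recursive_py index path subtree_depth out) := by unfold Spec_get_serialized_path_from_index_recursive_py; infer_instance

-- ===== CLAIM (what is proved, stated in full; the proofs are below) =====
def Claim_equal_get_serialized_path_from_index_recursive_py : Prop := ∀ (index : Int) (path : String) (subtree_depth : Int), Dom_get_serialized_path_from_index_recursive_py index path subtree_depth → Pre_get_serialized_path_from_index_recursive_py index path subtree_depth → Spec_get_serialized_path_from_index_recursive_py index path subtree_depth (get_serialized_path_from_index_recursive_py index path subtree_depth)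

-- ===== LEMMAS AND PROOFS =====

-- B's loop accumulates on the right.
lemma pvB_loop_acc (n : Nat) : ∀ (index d : Int) (bits : List Char), index.toNat = n →
    pvB_loop index d bits = bits ++ pvB_loop index d [] := by
  induction n using Nat.strong_induction_on with
  | _ n ih =>
    intro index d bits hn
    by_cases h1 : index ≤ 0
    · conv_lhs => rw [pvB_loop]
      conv_rhs => rw [pvB_loop]
      simp [h1]
    · have hp : (1:Int) ≤ 2 ^ d.toNat := one_le_pow₀ (by norm_num)
      by_cases h2 : 2 ^ d.toNat ≤ index
      · conv_lhs => rw [pvB_loop]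
        conv_rhs => rw [pvB_loop]
        rw [if_neg h1, if_pos h2, if_neg h1, if_pos h2]
        simp only [List.nil_append]
        rw [ih (index - 2 ^ d.toNat).toNat (by omega) _ _ (bits ++ ['1']) rfl,
            ih (index - 2 ^ d.toNat).toNat (by omega) _ _ ['1'] rfl]
        simp
      · conv_lhs => rw [pvB_loop]
        conv_rhs => rw [pvB_loop]
        rw [if_neg h1, if_neg h2, if_neg h1, if_neg h2]
        simp only [List.nil_append]
        rw [ih (index - 1).toNat (by omega) _ _ (bits ++ ['0']) rfl,
            ih (index - 1).toNat (by omega) _ _ ['0'] rfl]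
        simp

-- Main invariant: on valid inputs A's recursion returns exactly the path extended by B's bits.
lemma pvA_eq_pvB (n : Nat) : ∀ (index d : Int) (path : List Char), index.toNat = n →
    0 ≤ index → index < 2 ^ (d + 1).toNat → (index = 0 ∨ 0 ≤ d) →
    pvA_rec index path d = some (path ++ pvB_loop index d []) := by
  induction n using Nat.strong_induction_on with
  | _ n ih =>
    intro index d path hn h0 hub hcase
    by_cases hz : index = 0
    · subst hz
      rw [pvA_rec, pvB_loop]
      simp
    · have hd : 0 ≤ d := hcase.resolve_left hz
      have hdn : (d + 1).toNat = d.toNat + 1 := by omega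
      have hp : (0:Int) < 2 ^ d.toNat := by positivity
      have hub' : index < 2 * 2 ^ d.toNat := by
        have h2 : ((2:Int) ^ (d + 1).toNat) = 2 * 2 ^ d.toNat := by rw [hdn]; ring
        omega
      by_cases hlt : index < 2 ^ d.toNat
      · -- left branch: left_or_right = 0
        have hfd : PySem.Int.floordiv index (2 ^ d.toNat) = 0 := by
          rw [PySem.Int.floordiv_eq_iff_of_pos hp]; constructor <;> omega
        rw [PySem.Int.floordiv_eq_ediv_of_pos hp] at hfd
        have eA : pvA_rec index path d = pvA_rec (index - 1) (path ++ ['0']) (d - 1) := by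
          conv_lhs => rw [pvA_rec]
          simp [hz, hfd]
          intro hcontra
          omega
        have eB : pvB_loop index d [] = '0' :: pvB_loop (index - 1) (d - 1) [] := by
          conv_lhs => rw [pvB_loop]
          rw [if_neg (by omega), if_neg (by omega)]
          simp only [List.nil_append]
          rw [pvB_loop_acc (index - 1).toNat _ _ ['0'] rfl]
          rfl
        rw [eA, eB,
            ih (index - 1).toNat (by omega) (index - 1) (d - 1) (path ++ ['0']) rfl (by omega)
              (by have h3 : ((d - 1) + 1).toNat = d.toNat := by omega
                  rw [h3]; omega)
              (by by_cases h1 : index = 1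
                  · left; omega
                  · right
                    have h4 : (2:Int) ≤ index := by omega
                    have h5 : (2:Int) < 2 ^ d.toNat := by omega
                    have hd1 : 1 < d.toNat := by
                      by_contra hc
                      interval_cases h : d.toNat <;> omega
                    omega)]
        simp
      · -- right branch: left_or_right = 1, residual = index - 2^d
        have hfd : PySem.Int.floordiv index (2 ^ d.toNat) = 1 := by
          rw [PySem.Int.floordiv_eq_iff_of_pos hp]; constructor <;> omega
        have hmod : PySem.Int.mod index (2 ^ d.toNat) = index - 2 ^ d.toNat := by
          have h6 := PySem.Int.floordiv_mul_add_mod index (2 ^ d.toNat)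
          rw [hfd] at h6; omega
        rw [PySem.Int.floordiv_eq_ediv_of_pos hp] at hfd
        rw [PySem.Int.mod_eq_emod_of_pos hp] at hmod
        have eA : pvA_rec index path d = pvA_rec (index - 2 ^ d.toNat) (path ++ ['1']) (d - 1) := by
          conv_lhs => rw [pvA_rec]
          simp [hz, hfd, hmod]
          intro hcontra
          omega
        have eB : pvB_loop index d [] = '1' :: pvB_loop (index - 2 ^ d.toNat) (d - 1) [] := by
          conv_lhs => rw [pvB_loop]
          rw [if_neg (by omega), if_pos (by omega)]
          simp only [List.nil_append]
          rw [pvB_loop_acc (index - 2 ^ d.toNat).toNat _ _ ['1'] rfl]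
          rfl
        rw [eA, eB,
            ih (index - 2 ^ d.toNat).toNat (by omega) (index - 2 ^ d.toNat) (d - 1) (path ++ ['1']) rfl
              (by omega)
              (by have h3 : ((d - 1) + 1).toNat = d.toNat := by omega
                  rw [h3]; omega)
              (by by_cases h1 : index - 2 ^ d.toNat = 0
                  · left; exact h1
                  · right
                    have h4 : (2:Int) ^ d.toNat + 1 ≤ index := by omega
                    have h5 : (2:Int) ^ d.toNat + 1 < 2 * 2 ^ d.toNat := by omega
                    have hd1 : 1 ≤ d.toNat := by
                      by_contra hc
                      interval_cases h : d.toNat <;> omega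
                    omega)]
        simp

-- ===== VERDICT (by name: the statement is the Claim_ definition above) =====
theorem get_serialized_path_from_index_recursive_py_spec : Claim_equal_get_serialized_path_from_index_recursive_py := by
  intro index path subtree_depth _hdom hpre
  unfold Spec_get_serialized_path_from_index_recursive_py
  unfold get_serialized_path_from_index_recursive_py get_serialized_path_from_index_recursive_py_alt
  rcases hpre with hz | ⟨hd, hpos, hub⟩
  · subst hz
    rw [pvA_rec]
    simp [String.ofList_toList]
  · have h := pvA_eq_pvB index.toNat index subtree_depth path.toList rfl (by omega) hub (Or.inr hd)
    rw [h]
    have hcond : ¬ (subtree_depth < 0 ∨ ¬ (0 ≤ index ∧ index < 2 ^ (subtree_depth + 1).toNat)) := by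
      rintro (hc | hc)
      · omega
      · exact hc ⟨by omega, hub⟩
    rw [if_neg (by omega : ¬ index = 0), if_neg hcond]
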